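-- pv_equiv track=rewrite | github.com/amaoM/atcoder | python/beginner/20160611/D.py | check
-- ===== SOURCE A (Python) =====
-- def check(h, w, fs, ts, sl, tsl):
--     for i in range(h):
--         for j in range(w):
--             if sl[i][j] == fs: continue
--             tsl[i][j] = ts
--             if i > 0: tsl[i - 1][j] = ts
--             if h > i + 1: tsl[i + 1][j] = ts
--             if j > 0: tsl[i][j - 1] = ts
--             if w > j + 1: tsl[i][j + 1] = ts
--             if h > i + 1 and w > j + 1: tsl[i + 1][j + 1] = ts
--             if i > 0 and j > 0: tsl[i - 1][j - 1] = ts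
--             if h > i + 1 and j > 0: tsl[i + 1][j - 1] = ts
--             if i > 0 and w > j + 1: tsl[i - 1][j + 1] = ts
--     return tsl
-- ===== SOURCE B (Python) =====
-- def check(h, w, fs, ts, sl, tsl):
--     # gather instead of scatter: a cell is marked iff some in-bounds cell of its
--     # 3x3 neighborhood (including itself) differs from fs; mutates tsl like A does
--     for i in range(h):
--         for j in range(w):
--             if any(sl[p][q] != fs
--                    for p in range(max(i - 1, 0), min(i + 2, h))
--                    for q in range(max(j - 1, 0), min(j + 2, w))):
--                 tsl[i][j] = ts
--     return tsl
-- ===== Notes on version B (the rewrite author's own statement) =====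
-- stated objective: alternative
-- what changed: Scatter replaced by gather: instead of writing ts into up to nine neighbor cells of every non-fs cell, B writes only the current cell, setting tsl[i][j]=ts exactly when some in-bounds cell of its 3x3 neighborhood in sl differs from fs (the neighborhood relation is symmetric, so the marked set is identical).
-- outside the precondition, e.g. on check(1, 1, 'x', 'T', [['x']], []): A returns [], B returns []
import Mathlib
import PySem

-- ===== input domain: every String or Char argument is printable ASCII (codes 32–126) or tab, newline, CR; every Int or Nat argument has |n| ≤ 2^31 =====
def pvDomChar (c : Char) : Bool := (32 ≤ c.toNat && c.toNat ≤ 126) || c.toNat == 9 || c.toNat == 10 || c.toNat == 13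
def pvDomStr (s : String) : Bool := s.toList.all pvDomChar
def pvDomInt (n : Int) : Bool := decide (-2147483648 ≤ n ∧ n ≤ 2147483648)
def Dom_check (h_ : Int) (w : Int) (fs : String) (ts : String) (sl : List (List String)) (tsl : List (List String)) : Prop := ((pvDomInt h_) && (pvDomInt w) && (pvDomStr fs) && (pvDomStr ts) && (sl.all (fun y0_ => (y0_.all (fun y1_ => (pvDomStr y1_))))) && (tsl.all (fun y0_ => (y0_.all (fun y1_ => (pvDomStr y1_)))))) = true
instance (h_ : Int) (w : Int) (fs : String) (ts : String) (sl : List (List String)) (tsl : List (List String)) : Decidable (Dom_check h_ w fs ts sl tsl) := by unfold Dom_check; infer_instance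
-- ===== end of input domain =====

-- B replaces A's scatter (write ts into every in-bounds 8-neighbor of each non-fs cell)
-- by a gather (write the current cell iff its 3x3 in-bounds neighborhood holds a non-fs
-- cell); same marked set by symmetry.  Both Pythons mutate tsl in place; the equivalence
-- proved here is about the RETURN value.

-- ===== PORT A =====
-- shared helpers for Python's `x[i][j]` read and `x[i][j] = v` write (row fetched, then
-- element set, then row stored back); total via defaults, exact under Pre_'s bounds
def pvGet2 (t : List (List String)) (i j : Int) : String :=
  PySem.List.pyGetD (PySem.List.pyGetD t i []) j ""

def pvSet2 (t : List (List String)) (i j : Int) (v : String) : List (List String) :=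
  PySem.List.pySetD t i (PySem.List.pySetD (PySem.List.pyGetD t i []) j v)

def check (h_ : Int) (w : Int) (fs : String) (ts : String) (sl : List (List String)) (tsl : List (List String)) : List (List String) :=
  (PySem.List.pyRange 0 h_ 1).foldl (fun t i =>
    (PySem.List.pyRange 0 w 1).foldl (fun t j =>
      if pvGet2 sl i j = fs then t
      else
        let t := pvSet2 t i j ts
        let t := if 0 < i then pvSet2 t (i-1) j ts else t
        let t := if i + 1 < h_ then pvSet2 t (i+1) j ts else t
        let t := if 0 < j then pvSet2 t i (j-1) ts else t
        let t := if j + 1 < w then pvSet2 t i (j+1) ts else t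
        let t := if i + 1 < h_ ∧ j + 1 < w then pvSet2 t (i+1) (j+1) ts else t
        let t := if 0 < i ∧ 0 < j then pvSet2 t (i-1) (j-1) ts else t
        let t := if i + 1 < h_ ∧ 0 < j then pvSet2 t (i+1) (j-1) ts else t
        if 0 < i ∧ j + 1 < w then pvSet2 t (i-1) (j+1) ts else t) t) tsl

-- ===== PORT B =====
def check_alt (h_ : Int) (w : Int) (fs : String) (ts : String) (sl : List (List String)) (tsl : List (List String)) : List (List String) :=
  (PySem.List.pyRange 0 h_ 1).foldl (fun t i =>
    (PySem.List.pyRange 0 w 1).foldl (fun t j =>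
      if ((PySem.List.pyRange (max (i-1) 0) (min (i+2) h_) 1).any (fun p =>
           (PySem.List.pyRange (max (j-1) 0) (min (j+2) w) 1).any (fun q =>
             !(pvGet2 sl p q == fs))))
      then pvSet2 t i j ts else t) t) tsl

-- ===== PRECONDITION & SPEC =====
-- Pre_ excludes the inputs where Python A raises IndexError: a non-degenerate grid whose
-- sl or tsl lacks the full h×w shape.  It slightly narrows: it also asks the tsl bound
-- when every cell equals fs and A (writing nothing) would return; B returns the same there.
def Pre_check (h_ : Int) (w : Int) (fs : String) (ts : String) (sl : List (List String)) (tsl : List (List String)) : Prop :=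
  0 < h_ → 0 < w →
    h_ ≤ (sl.length : Int) ∧ h_ ≤ (tsl.length : Int) ∧
    (∀ p : Nat, p < h_.toNat → w ≤ ((sl.getD p []).length : Int)) ∧
    (∀ p : Nat, p < h_.toNat → w ≤ ((tsl.getD p []).length : Int))
instance (h_ : Int) (w : Int) (fs : String) (ts : String) (sl : List (List String)) (tsl : List (List String)) : Decidable (Pre_check h_ w fs ts sl tsl) := by unfold Pre_check; infer_instance

def pvWitness_check : Int × Int × String × String × List (List String) × List (List String) :=
  (2, 2, "x", "T", [["x", "a"], ["x", "x"]], [["0", "1"], ["2", "3"]])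

def Spec_check (h_ : Int) (w : Int) (fs : String) (ts : String) (sl : List (List String)) (tsl : List (List String)) (out : List (List String)) : Prop := out = check_alt h_ w fs ts sl tsl
instance (h_ : Int) (w : Int) (fs : String) (ts : String) (sl : List (List String)) (tsl : List (List String)) (out : List (List String)) : Decidable (Spec_check h_ w fs ts sl tsl out) := by unfold Spec_check; infer_instance

-- ===== CLAIM (what is proved, stated in full; the proofs are below) =====
def Claim_equal_check : Prop := ∀ (h_ : Int) (w : Int) (fs : String) (ts : String) (sl : List (List String)) (tsl : List (List String)), Dom_check h_ w fs ts sl tsl → Pre_check h_ w fs ts sl tsl → Spec_check h_ w fs ts sl tsl (check h_ w fs ts sl tsl)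

-- ===== LEMMAS AND PROOFS =====

-- A's inner-loop body, named for the proofs (definitionally the lambda inside `check`)
def pvStepA (h_ w : Int) (fs ts : String) (sl : List (List String)) (i : Int) : List (List String) → Int → List (List String) :=
  fun t j =>
    if pvGet2 sl i j = fs then t
    else
      let t := pvSet2 t i j ts
      let t := if 0 < i then pvSet2 t (i-1) j ts else t
      let t := if i + 1 < h_ then pvSet2 t (i+1) j ts else t
      let t := if 0 < j then pvSet2 t i (j-1) ts else t
      let t := if j + 1 < w then pvSet2 t i (j+1) ts else t
      let t := if i + 1 < h_ ∧ j + 1 < w then pvSet2 t (i+1) (j+1) ts else t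
      let t := if 0 < i ∧ 0 < j then pvSet2 t (i-1) (j-1) ts else t
      let t := if i + 1 < h_ ∧ 0 < j then pvSet2 t (i+1) (j-1) ts else t
      if 0 < i ∧ j + 1 < w then pvSet2 t (i-1) (j+1) ts else t

-- B's inner-loop body, named for the proofs
def pvStepB (h_ w : Int) (fs ts : String) (sl : List (List String)) (i : Int) : List (List String) → Int → List (List String) :=
  fun t j =>
    if ((PySem.List.pyRange (max (i-1) 0) (min (i+2) h_) 1).any (fun p =>
         (PySem.List.pyRange (max (j-1) 0) (min (j+2) w) 1).any (fun q =>
           !(pvGet2 sl p q == fs))))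
    then pvSet2 t i j ts else t

theorem check_eq_fold (h_ w : Int) (fs ts : String) (sl tsl : List (List String)) :
    check h_ w fs ts sl tsl =
      (PySem.List.pyRange 0 h_ 1).foldl
        (fun t i => (PySem.List.pyRange 0 w 1).foldl (pvStepA h_ w fs ts sl i) t) tsl := rfl

theorem check_alt_eq_fold (h_ w : Int) (fs ts : String) (sl tsl : List (List String)) :
    check_alt h_ w fs ts sl tsl =
      (PySem.List.pyRange 0 h_ 1).foldl
        (fun t i => (PySem.List.pyRange 0 w 1).foldl (pvStepB h_ w fs ts sl i) t) tsl := rfl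

-- total 2-d read with Nat indices, used to state the loop invariants
def pvGG (t : List (List String)) (p q : Nat) : String := (t.getD p []).getD q ""

-- `t` has the same row set-up as the original `t0`
def pvShape (t t0 : List (List String)) : Prop :=
  t.length = t0.length ∧ ∀ p : Nat, (t.getD p []).length = (t0.getD p []).length

-- pointwise description of a state: cells satisfying C hold ts, others the original value
def pvPt (ts : String) (t t0 : List (List String)) (C : Int → Int → Prop) : Prop :=
  ∀ p q : Nat, p < t0.length → q < (t0.getD p []).length →
    (C p q → pvGG t p q = ts) ∧ (¬ C p q → pvGG t p q = pvGG t0 p q)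

-- the set of cells a pass of A over source cell (i, j) writes
def pvHit (h_ w : Int) (fs : String) (sl : List (List String)) (i j p q : Int) : Prop :=
  pvGet2 sl i j ≠ fs ∧ i - 1 ≤ p ∧ p ≤ i + 1 ∧ j - 1 ≤ q ∧ q ≤ j + 1 ∧
    0 ≤ p ∧ p < h_ ∧ 0 ≤ q ∧ q < w

theorem pvPt_congr {ts : String} {t t0 : List (List String)} {C C' : Int → Int → Prop}
    (hc : ∀ p q, C p q ↔ C' p q) (h : pvPt ts t t0 C) : pvPt ts t t0 C' := by
  intro p q hp hq
  obtain ⟨h1, h2⟩ := h p q hp hq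
  exact ⟨fun hC => h1 ((hc _ _).2 hC), fun hC => h2 (fun hx => hC ((hc _ _).1 hx))⟩

theorem pvGetD_set {α : Type} (t : List α) (n : Nat) (r : α) (d : α) (p : Nat) :
    (t.set n r).getD p d = if p = n ∧ n < t.length then r else t.getD p d := by
  simp [List.getD_eq_getElem?_getD, List.getElem?_set]
  split_ifs <;> simp_all

theorem pvSet2_eq (t : List (List String)) (a b : Int) (v : String)
    (ha0 : 0 ≤ a) (hb0 : 0 ≤ b) :
    pvSet2 t a b v = t.set a.toNat ((t.getD a.toNat []).set b.toNat v) := by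
  unfold pvSet2
  rw [PySem.List.pySetD_of_nonneg _ _ ha0, PySem.List.pySetD_of_nonneg _ _ hb0,
      PySem.List.pyGetD_of_nonneg _ _ ha0]

theorem pvShape_set2 {t t0 : List (List String)} (hsh : pvShape t t0) (a b : Int) (v : String)
    (ha0 : 0 ≤ a) (hb0 : 0 ≤ b) : pvShape (pvSet2 t a b v) t0 := by
  rw [pvSet2_eq t a b v ha0 hb0]
  refine ⟨by simpa using hsh.1, fun p => ?_⟩
  rw [pvGetD_set]
  split_ifs with h
  · simp only [List.length_set, h.1]
    exact hsh.2 a.toNat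
  · exact hsh.2 p

theorem pvPt_set2 {ts : String} {t t0 : List (List String)} {C : Int → Int → Prop}
    (hsh : pvShape t t0) (hpt : pvPt ts t t0 C) (a b : Int)
    (ha0 : 0 ≤ a) (ha : a < (t0.length : Int))
    (hb0 : 0 ≤ b) (hb : b < ((t0.getD a.toNat []).length : Int)) :
    pvPt ts (pvSet2 t a b ts) t0 (fun p q => C p q ∨ (p = a ∧ q = b)) := by
  intro p q hp hq
  have hlen : a.toNat < t.length := by rw [hsh.1]; omega
  have hrow : b.toNat < (t.getD a.toNat []).length := by rw [hsh.2]; omega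
  have base := hpt p q hp hq
  have key : pvGG (pvSet2 t a b ts) p q
      = if p = a.toNat ∧ q = b.toNat then ts else pvGG t p q := by
    rw [pvSet2_eq t a b ts ha0 hb0]
    unfold pvGG
    rw [pvGetD_set]
    by_cases h1 : p = a.toNat
    · subst h1
      rw [if_pos ⟨rfl, hlen⟩, pvGetD_set]
      by_cases h2 : q = b.toNat
      · subst h2
        rw [if_pos ⟨rfl, hrow⟩, if_pos ⟨rfl, rfl⟩]
      · rw [if_neg (fun hx => h2 hx.1), if_neg (fun hx => h2 hx.2)]
    · rw [if_neg (fun hx => h1 hx.1), if_neg (fun hx => h1 hx.1)]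
  constructor
  · rintro (hC | ⟨hpa, hqb⟩)
    · rw [key]; split_ifs with hx
      · rfl
      · exact base.1 hC
    · rw [key, if_pos ⟨by omega, by omega⟩]
  · intro hC'
    rw [key, if_neg (by intro hx; exact hC' (Or.inr ⟨by omega, by omega⟩))]
    exact base.2 (fun hx => hC' (Or.inl hx))

theorem pvCondSet {ts : String} {t t0 : List (List String)} {C : Int → Int → Prop}
    (hsh : pvShape t t0) (hpt : pvPt ts t t0 C) (c : Prop) [Decidable c] (a b : Int)
    (hc : c → (0 ≤ a ∧ a < (t0.length : Int) ∧ 0 ≤ b ∧ b < ((t0.getD a.toNat []).length : Int))) :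
    pvShape (if c then pvSet2 t a b ts else t) t0 ∧
    pvPt ts (if c then pvSet2 t a b ts else t) t0 (fun p q => C p q ∨ (c ∧ p = a ∧ q = b)) := by
  by_cases hcc : c
  all_goals simp only [hcc, if_true, if_false]
  case pos =>
    obtain ⟨h1, h2, h3, h4⟩ := hc hcc
    exact ⟨pvShape_set2 hsh a b ts h1 h3,
      pvPt_congr (by intro p q; constructor <;> (rintro (h | h) <;> tauto))
        (pvPt_set2 hsh hpt a b h1 h2 h3 h4)⟩
  case neg =>
    exact ⟨hsh, pvPt_congr (by intro p q; tauto) hpt⟩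

-- one pass of A over source cell (i, j) writes exactly the in-bounds 3x3 block around it
theorem pvStepA_pt (h_ w : Int) (fs ts : String) (sl : List (List String))
    {t0 t : List (List String)} {C : Int → Int → Prop} (i j : Int)
    (hi0 : 0 ≤ i) (hi : i < h_) (hj0 : 0 ≤ j) (hj : j < w)
    (hH : h_ ≤ (t0.length : Int))
    (hW : ∀ p : Nat, (p : Int) < h_ → w ≤ ((t0.getD p []).length : Int))
    (hsh : pvShape t t0) (hpt : pvPt ts t t0 C) :
    pvShape (pvStepA h_ w fs ts sl i t j) t0 ∧
    pvPt ts (pvStepA h_ w fs ts sl i t j) t0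
      (fun p q => C p q ∨ pvHit h_ w fs sl i j p q) := by
  have bnd : ∀ a b : Int, 0 ≤ a → a < h_ → 0 ≤ b → b < w →
      (0 ≤ a ∧ a < (t0.length : Int) ∧ 0 ≤ b ∧ b < ((t0.getD a.toNat []).length : Int)) := by
    intro a b h1 h2 h3 h4
    refine ⟨h1, by omega, h3, ?_⟩
    have := hW a.toNat (by omega)
    omega
  unfold pvStepA
  by_cases hsrc : pvGet2 sl i j = fs
  · simp only [if_pos hsrc]
    refine ⟨hsh, pvPt_congr ?_ hpt⟩
    intro p q
    unfold pvHit
    tauto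
  · simp only [if_neg hsrc]
    obtain ⟨b1, b2, b3, b4⟩ := bnd i j hi0 hi hj0 hj
    have h0s := pvShape_set2 hsh i j ts hi0 hj0
    have h0p := pvPt_set2 hsh hpt i j b1 b2 b3 b4
    have h1 := pvCondSet h0s h0p (0 < i) (i-1) j
      (fun hc => bnd _ _ (by omega) (by omega) hj0 hj)
    have h2 := pvCondSet h1.1 h1.2 (i + 1 < h_) (i+1) j
      (fun hc => bnd _ _ (by omega) (by omega) hj0 hj)
    have h3 := pvCondSet h2.1 h2.2 (0 < j) i (j-1)
      (fun hc => bnd _ _ hi0 hi (by omega) (by omega))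
    have h4 := pvCondSet h3.1 h3.2 (j + 1 < w) i (j+1)
      (fun hc => bnd _ _ hi0 hi (by omega) (by omega))
    have h5 := pvCondSet h4.1 h4.2 (i + 1 < h_ ∧ j + 1 < w) (i+1) (j+1)
      (fun hc => bnd _ _ (by omega) (by omega) (by omega) (by omega))
    have h6 := pvCondSet h5.1 h5.2 (0 < i ∧ 0 < j) (i-1) (j-1)
      (fun hc => bnd _ _ (by omega) (by omega) (by omega) (by omega))
    have h7 := pvCondSet h6.1 h6.2 (i + 1 < h_ ∧ 0 < j) (i+1) (j-1)
      (fun hc => bnd _ _ (by omega) (by omega) (by omega) (by omega))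
    have h8 := pvCondSet h7.1 h7.2 (0 < i ∧ j + 1 < w) (i-1) (j+1)
      (fun hc => bnd _ _ (by omega) (by omega) (by omega) (by omega))
    refine ⟨h8.1, pvPt_congr ?_ h8.2⟩
    intro p q
    unfold pvHit
    constructor
    · rintro (((((((((hC | h) | h) | h) | h) | h) | h) | h) | h) | h)
      · exact Or.inl hC
      all_goals
        exact Or.inr ⟨hsrc, by omega, by omega, by omega, by omega,
          by omega, by omega, by omega, by omega⟩
    · rintro (hC | ⟨-, hp1, hp2, hq1, hq2, hp0, hph, hq0, hqw⟩)
      · exact Or.inl (Or.inl (Or.inl (Or.inl (Or.inl (Or.inl (Or.inl (Or.inl (Or.inl hC))))))))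
      have hp : p = i - 1 ∨ p = i ∨ p = i + 1 := by omega
      have hq : q = j - 1 ∨ q = j ∨ q = j + 1 := by omega
      rcases hp with hp | hp | hp <;> rcases hq with hq | hq | hq
      · exact Or.inl (Or.inl (Or.inr ⟨⟨by omega, by omega⟩, by omega, by omega⟩))
      · exact Or.inl (Or.inl (Or.inl (Or.inl (Or.inl (Or.inl (Or.inl (Or.inr ⟨by omega, by omega, by omega⟩)))))))
      · exact Or.inr ⟨⟨by omega, by omega⟩, by omega, by omega⟩
      · exact Or.inl (Or.inl (Or.inl (Or.inl (Or.inl (Or.inr ⟨by omega, by omega, by omega⟩)))))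
      · exact Or.inl (Or.inl (Or.inl (Or.inl (Or.inl (Or.inl (Or.inl (Or.inl (Or.inr ⟨by omega, by omega⟩))))))))
      · exact Or.inl (Or.inl (Or.inl (Or.inl (Or.inr ⟨by omega, by omega, by omega⟩))))
      · exact Or.inl (Or.inr ⟨⟨by omega, by omega⟩, by omega, by omega⟩)
      · exact Or.inl (Or.inl (Or.inl (Or.inl (Or.inl (Or.inl (Or.inr ⟨by omega, by omega, by omega⟩))))))
      · exact Or.inl (Or.inl (Or.inl (Or.inr ⟨⟨by omega, by omega⟩, by omega, by omega⟩)))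

-- B's gather condition at cell (i, j), as a proposition
def pvNb (h_ w : Int) (fs : String) (sl : List (List String)) (i j : Int) : Prop :=
  ∃ a b : Int, max (i-1) 0 ≤ a ∧ a < min (i+2) h_ ∧ max (j-1) 0 ≤ b ∧ b < min (j+2) w ∧
    pvGet2 sl a b ≠ fs

theorem pvStepB_pt (h_ w : Int) (fs ts : String) (sl : List (List String))
    {t0 t : List (List String)} {C : Int → Int → Prop} (i j : Int)
    (hi0 : 0 ≤ i) (hi : i < h_) (hj0 : 0 ≤ j) (hj : j < w)
    (hH : h_ ≤ (t0.length : Int))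
    (hW : ∀ p : Nat, (p : Int) < h_ → w ≤ ((t0.getD p []).length : Int))
    (hsh : pvShape t t0) (hpt : pvPt ts t t0 C) :
    pvShape (pvStepB h_ w fs ts sl i t j) t0 ∧
    pvPt ts (pvStepB h_ w fs ts sl i t j) t0
      (fun p q => C p q ∨ (pvNb h_ w fs sl i j ∧ p = i ∧ q = j)) := by
  have hb2 : i < (t0.length : Int) := by omega
  have hb4 : j < ((t0.getD i.toNat []).length : Int) := by
    have := hW i.toNat (by omega); omega
  have hcond : ((PySem.List.pyRange (max (i-1) 0) (min (i+2) h_) 1).any (fun p =>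
      (PySem.List.pyRange (max (j-1) 0) (min (j+2) w) 1).any (fun q =>
        !(pvGet2 sl p q == fs))) = true) ↔ pvNb h_ w fs sl i j := by
    simp [pvNb, List.any_eq_true, PySem.List.mem_pyRange_one]
    tauto
  unfold pvStepB
  have h1 := pvCondSet hsh hpt (((PySem.List.pyRange (max (i-1) 0) (min (i+2) h_) 1).any (fun p =>
      (PySem.List.pyRange (max (j-1) 0) (min (j+2) w) 1).any (fun q =>
        !(pvGet2 sl p q == fs)))) = true) i j
    (fun _ => ⟨hi0, hb2, hj0, hb4⟩)
  refine ⟨h1.1, pvPt_congr ?_ h1.2⟩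
  intro p q
  rw [hcond]

-- generic loop invariant: folding a step that adds write-set H x over range [a, m)
theorem pvFoldRange {ts : String} {t0 : List (List String)} (m : Int)
    (step : List (List String) → Int → List (List String)) (H : Int → Int → Int → Prop)
    (hstep : ∀ (x : Int) (t : List (List String)) (C : Int → Int → Prop),
      0 ≤ x → x < m → pvShape t t0 → pvPt ts t t0 C →
      pvShape (step t x) t0 ∧ pvPt ts (step t x) t0 (fun p q => C p q ∨ H x p q)) :
    ∀ (n : Nat) (a : Int) (t : List (List String)) (C : Int → Int → Prop),
      0 ≤ a → (m - a).toNat = n → pvShape t t0 → pvPt ts t t0 C →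
      pvShape ((PySem.List.pyRange a m 1).foldl step t) t0 ∧
      pvPt ts ((PySem.List.pyRange a m 1).foldl step t) t0
        (fun p q => C p q ∨ ∃ x, a ≤ x ∧ x < m ∧ H x p q) := by
  intro n
  induction n with
  | zero =>
    intro a t C ha hn hsh hpt
    rw [PySem.List.pyRange_one_eq_nil (by omega)]
    refine ⟨hsh, pvPt_congr ?_ hpt⟩
    intro p q
    constructor
    · exact Or.inl
    · rintro (hC | ⟨x, hx1, hx2, -⟩)
      · exact hC
      · omega
  | succ n ih =>
    intro a t C ha hn hsh hpt
    rw [PySem.List.pyRange_one_cons (by omega)]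
    simp only [List.foldl_cons]
    obtain ⟨hsh1, hpt1⟩ := hstep a t C ha (by omega) hsh hpt
    obtain ⟨hsh2, hpt2⟩ := ih (a+1) (step t a) _ (by omega) (by omega) hsh1 hpt1
    refine ⟨hsh2, pvPt_congr ?_ hpt2⟩
    intro p q
    constructor
    · rintro ((hC | hH) | ⟨x, hx1, hx2, hx3⟩)
      · exact Or.inl hC
      · exact Or.inr ⟨a, by omega, by omega, hH⟩
      · exact Or.inr ⟨x, by omega, hx2, hx3⟩
    · rintro (hC | ⟨x, hx1, hx2, hx3⟩)
      · exact Or.inl (Or.inl hC)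
      · rcases eq_or_lt_of_le hx1 with rfl | hlt
        · exact Or.inl (Or.inr hx3)
        · exact Or.inr ⟨x, by omega, hx2, hx3⟩

-- two states over the same original with equivalent marked sets are equal lists
theorem pvEq_of_pt {ts : String} {t0 t1 t2 : List (List String)}
    {C1 C2 : Int → Int → Prop}
    (sh1 : pvShape t1 t0) (sh2 : pvShape t2 t0)
    (pt1 : pvPt ts t1 t0 C1) (pt2 : pvPt ts t2 t0 C2)
    (hc : ∀ p q : Nat, C1 p q ↔ C2 p q) : t1 = t2 := by
  have hlen : t1.length = t2.length := by rw [sh1.1, sh2.1]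
  apply List.ext_getElem hlen
  intro p hp1 hp2
  have hp0 : p < t0.length := by rw [← sh1.1]; exact hp1
  have hr1 : t1[p] = t1.getD p [] := by rw [List.getD_eq_getElem _ _ hp1]
  have hr2 : t2[p] = t2.getD p [] := by rw [List.getD_eq_getElem _ _ hp2]
  apply List.ext_getElem
  · rw [hr1, hr2, sh1.2, sh2.2]
  intro q hq1 hq2
  have hq0 : q < (t0.getD p []).length := by
    rw [← sh1.2 p]
    rw [hr1] at hq1
    exact hq1
  have g1 : t1[p][q] = pvGG t1 p q := by
    unfold pvGG
    rw [← hr1, List.getD_eq_getElem _ _ hq1]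
  have g2 : t2[p][q] = pvGG t2 p q := by
    unfold pvGG
    rw [← hr2, List.getD_eq_getElem _ _ hq2]
  rw [g1, g2]
  by_cases hC : C1 p q
  · rw [(pt1 p q hp0 hq0).1 hC, (pt2 p q hp0 hq0).1 ((hc p q).1 hC)]
  · rw [(pt1 p q hp0 hq0).2 hC, (pt2 p q hp0 hq0).2 (fun hx => hC ((hc p q).2 hx))]

-- the scatter's marked set and the gather's marked set coincide
theorem pvMark_iff (h_ w : Int) (fs : String) (sl : List (List String)) (p q : Int) :
    (∃ i, 0 ≤ i ∧ i < h_ ∧ ∃ j, 0 ≤ j ∧ j < w ∧ pvHit h_ w fs sl i j p q) ↔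
    (∃ i, 0 ≤ i ∧ i < h_ ∧ ∃ j, 0 ≤ j ∧ j < w ∧ (pvNb h_ w fs sl i j ∧ p = i ∧ q = j)) := by
  constructor
  · rintro ⟨i, hi0, hi1, j, hj0, hj1, hsrc, h1, h2, h3, h4, h5, h6, h7, h8⟩
    exact ⟨p, by omega, by omega, q, by omega, by omega,
      ⟨i, j, by omega, by omega, by omega, by omega, hsrc⟩, rfl, rfl⟩
  · rintro ⟨i, hi0, hi1, j, hj0, hj1, ⟨a, b, h1, h2, h3, h4, hsrc⟩, rfl, rfl⟩
    exact ⟨a, by omega, by omega, b, by omega, by omega,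
      hsrc, by omega, by omega, by omega, by omega, by omega, by omega, by omega, by omega⟩

theorem pvFoldl_id (l : List Int) (t : List (List String)) :
    l.foldl (fun t _ => t) t = t := by
  induction l generalizing t with
  | nil => rfl
  | cons x l ih => exact ih t

-- ===== VERDICT (by name: the statement is the Claim_ definition above) =====
theorem check_spec : Claim_equal_check := by
  intro h_ w fs ts sl tsl hdom hpre
  unfold Spec_check
  by_cases hh : 0 < h_
  · by_cases hw : 0 < w
    · obtain ⟨hsl, htl, hsw, htw⟩ := hpre hh hw
      rw [check_eq_fold, check_alt_eq_fold]
      have hW : ∀ p : Nat, (p : Int) < h_ → w ≤ ((tsl.getD p []).length : Int) :=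
        fun p hp => htw p (by omega)
      have hsh0 : pvShape tsl tsl := ⟨rfl, fun p => rfl⟩
      have hpt0 : pvPt ts tsl tsl (fun _ _ => False) :=
        fun p q hp hq => ⟨fun f => f.elim, fun _ => rfl⟩
      have hA := pvFoldRange (t0 := tsl) h_
        (fun t i => (PySem.List.pyRange 0 w 1).foldl (pvStepA h_ w fs ts sl i) t)
        (fun i p q => ∃ j, 0 ≤ j ∧ j < w ∧ pvHit h_ w fs sl i j p q)
        (fun i t C hi0 hi1 hsh hpt =>
          pvFoldRange (t0 := tsl) w (pvStepA h_ w fs ts sl i) (pvHit h_ w fs sl i)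
            (fun j t C hj0 hj1 hsh hpt =>
              pvStepA_pt h_ w fs ts sl i j hi0 hi1 hj0 hj1 htl hW hsh hpt)
            w.toNat 0 t C le_rfl (by omega) hsh hpt)
        h_.toNat 0 tsl (fun _ _ => False) le_rfl (by omega) hsh0 hpt0
      have hB := pvFoldRange (t0 := tsl) h_
        (fun t i => (PySem.List.pyRange 0 w 1).foldl (pvStepB h_ w fs ts sl i) t)
        (fun i p q => ∃ j, 0 ≤ j ∧ j < w ∧ (pvNb h_ w fs sl i j ∧ p = i ∧ q = j))
        (fun i t C hi0 hi1 hsh hpt =>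
          pvFoldRange (t0 := tsl) w (pvStepB h_ w fs ts sl i)
            (fun j p q => pvNb h_ w fs sl i j ∧ p = i ∧ q = j)
            (fun j t C hj0 hj1 hsh hpt =>
              pvStepB_pt h_ w fs ts sl i j hi0 hi1 hj0 hj1 htl hW hsh hpt)
            w.toNat 0 t C le_rfl (by omega) hsh hpt)
        h_.toNat 0 tsl (fun _ _ => False) le_rfl (by omega) hsh0 hpt0
      refine pvEq_of_pt hA.1 hB.1 hA.2 hB.2 ?_
      intro p q
      constructor
      · rintro (f | h)
        · exact f.elim
        · exact Or.inr ((pvMark_iff h_ w fs sl p q).1 h)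
      · rintro (f | h)
        · exact f.elim
        · exact Or.inr ((pvMark_iff h_ w fs sl p q).2 h)
    · rw [check_eq_fold, check_alt_eq_fold]
      simp only [PySem.List.pyRange_one_eq_nil (show w ≤ 0 by omega), List.foldl_nil]
      try rw [pvFoldl_id, pvFoldl_id]
  · rw [check_eq_fold, check_alt_eq_fold]
    rw [PySem.List.pyRange_one_eq_nil (show h_ ≤ 0 by omega)]
    rfl
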